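-- pv_equiv track=rewrite | github.com/theinterneti/TTA | src/player_experience/security/input_validator.py | _check_malicious_html
-- ===== SOURCE A (Python) =====
-- def _check_malicious_html(input_data: str) -> bool:
--     """Check for malicious HTML content."""
--     # Check for dangerous tags and attributes
--     dangerous_tags = [
--         "script",
--         "iframe",
--         "object",
--         "embed",
--         "link",
--         "meta",
--         "style",
--     ]
--     dangerous_attrs = ["onload", "onerror", "onclick", "onmouseover", "onfocus"]
--
--     input_lower = input_data.lower()
--
--     for tag in dangerous_tags:
--         if f"<{tag}" in input_lower:
--             return False
--
--     for attr in dangerous_attrs: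
--         if attr in input_lower:
--             return False
--
--     return True
-- ===== SOURCE B (Python) =====
-- _PATTERNS = ("<script", "<iframe", "<object", "<embed", "<link", "<meta",
--              "<style", "onload", "onerror", "onclick", "onmouseover", "onfocus")
--
--
-- def _check_malicious_html(input_data: str) -> bool:
--     """Single left-to-right pass: at each position test whether any dangerous
--     pattern starts there, instead of one substring scan per pattern."""
--     low = input_data.lower()
--     for i in range(len(low)):
--         if any(low.startswith(p, i) for p in _PATTERNS):
--             return False
--     return True
-- ===== Notes on version B (the rewrite author's own statement) =====
-- stated objective: alternative
-- what changed: Replaces A's twelve sequential per-pattern substring scans of the lowered string with one left-to-right pass over positions that tests all patterns at each position via startswith, so the string is traversed once and no per-pattern scan loop remains (trades this for a per-position pattern check, which is slower in CPython).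
import Mathlib
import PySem

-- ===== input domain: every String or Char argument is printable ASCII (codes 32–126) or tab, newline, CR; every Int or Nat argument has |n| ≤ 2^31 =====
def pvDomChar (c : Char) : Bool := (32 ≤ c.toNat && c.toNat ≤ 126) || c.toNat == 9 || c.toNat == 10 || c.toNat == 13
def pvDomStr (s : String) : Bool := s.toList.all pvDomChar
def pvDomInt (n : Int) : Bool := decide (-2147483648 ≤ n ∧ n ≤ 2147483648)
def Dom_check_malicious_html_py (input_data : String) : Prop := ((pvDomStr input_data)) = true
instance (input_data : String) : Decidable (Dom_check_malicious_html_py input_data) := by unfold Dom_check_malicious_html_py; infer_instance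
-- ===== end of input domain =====

-- B replaces A's twelve per-pattern substring scans by one left-to-right pass
-- testing every pattern at each position (objective: alternative).

-- ===== PORT A =====
def check_malicious_html_py (input_data : String) : Bool :=
  let dangerous_tags : List String :=
    ["script", "iframe", "object", "embed", "link", "meta", "style"]
  let dangerous_attrs : List String :=
    ["onload", "onerror", "onclick", "onmouseover", "onfocus"]
  let input_lower := PySem.Str.lower input_data
  -- 'for tag in dangerous_tags: if f"<{tag}" in input_lower: return False'
  if dangerous_tags.any (fun tag => PySem.Str.isIn ("<" ++ tag) input_lower) then
    false
  -- 'for attr in dangerous_attrs: if attr in input_lower: return False'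
  else if dangerous_attrs.any (fun attr => PySem.Str.isIn attr input_lower) then
    false
  else
    true

-- ===== PORT B =====
-- the tuple _PATTERNS, as lists of characters
def pvPatterns : List (List Char) :=
  ["<script".toList, "<iframe".toList, "<object".toList, "<embed".toList,
   "<link".toList, "<meta".toList, "<style".toList, "onload".toList,
   "onerror".toList, "onclick".toList, "onmouseover".toList, "onfocus".toList]

-- 'for i in range(len(low)): if any(low.startswith(p, i) …): return False'
-- one pass over the suffixes of low; low.startswith(p, i) = p prefix of the suffix at i
def pvScan : List Char → Bool
  | [] => true
  | c :: rest =>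
    if pvPatterns.any (fun p => p.isPrefixOf (c :: rest)) then false
    else pvScan rest

def check_malicious_html_py_alt (input_data : String) : Bool :=
  pvScan (PySem.Str.lower input_data).toList

-- ===== PRECONDITION & SPEC =====
def Spec_check_malicious_html_py (input_data : String) (out : Bool) : Prop := out = check_malicious_html_py_alt input_data
instance (input_data : String) (out : Bool) : Decidable (Spec_check_malicious_html_py input_data out) := by unfold Spec_check_malicious_html_py; infer_instance

-- ===== CLAIM (what is proved, stated in full; the proofs are below) =====
def Claim_equal_check_malicious_html_py : Prop := ∀ (input_data : String), Dom_check_malicious_html_py input_data → Spec_check_malicious_html_py input_data (check_malicious_html_py input_data)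

-- ===== LEMMAS AND PROOFS =====

-- B's scan returns false exactly when some dangerous pattern occurs as an infix
theorem pvScan_eq_false_iff (l : List Char) :
    pvScan l = false ↔ ∃ p ∈ pvPatterns, p <:+: l := by
  induction l with
  | nil =>
    simp only [pvScan]
    constructor
    · intro h; exact absurd h (by simp)
    · rintro ⟨p, hp, hinf⟩
      have : p = [] := List.eq_nil_of_infix_nil hinf
      subst this
      revert hp; decide
  | cons c rest ih =>
    simp only [pvScan]
    by_cases h : pvPatterns.any (fun p => p.isPrefixOf (c :: rest)) = true
    · simp only [h, if_true, true_iff]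
      rcases List.any_eq_true.mp h with ⟨p, hp, hpref⟩
      exact ⟨p, hp, (List.isPrefixOf_iff_prefix.mp hpref).isInfix⟩
    · rw [if_neg h, ih]
      constructor
      · rintro ⟨p, hp, hinf⟩
        exact ⟨p, hp, hinf.trans (List.infix_cons_iff.mpr (Or.inr (List.infix_refl rest)))⟩
      · rintro ⟨p, hp, hinf⟩
        rcases List.infix_cons_iff.mp hinf with hpre | hinf'
        · exact absurd (show (pvPatterns.any fun p => p.isPrefixOf (c :: rest)) = true from
            List.any_eq_true.mpr ⟨p, hp, List.isPrefixOf_iff_prefix.mpr hpre⟩) h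
        · exact ⟨p, hp, hinf'⟩

-- A's two any-loops over its pattern lists say exactly "no pattern is an infix"
theorem pyA_loops_eq_false_iff (low : String) :
    (((["script", "iframe", "object", "embed", "link", "meta", "style"] : List String).any
        (fun tag => PySem.Str.isIn ("<" ++ tag) low)
      || (["onload", "onerror", "onclick", "onmouseover", "onfocus"] : List String).any
        (fun attr => PySem.Str.isIn attr low)) = false)
    ↔ ¬ ∃ p ∈ pvPatterns, p <:+: low.toList := by
  simp [pvPatterns, PySem.Chars.isIn_eq_false_iff]
  tauto

theorem check_malicious_html_py_spec : Claim_equal_check_malicious_html_py := by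
  intro input_data _
  unfold Spec_check_malicious_html_py check_malicious_html_py check_malicious_html_py_alt
  simp only []
  set low := PySem.Str.lower input_data with hlow
  set X := (["script", "iframe", "object", "embed", "link", "meta", "style"] : List String).any
    (fun tag => PySem.Str.isIn ("<" ++ tag) low) with hX
  set Y := (["onload", "onerror", "onclick", "onmouseover", "onfocus"] : List String).any
    (fun attr => PySem.Str.isIn attr low) with hY
  have hiff := pyA_loops_eq_false_iff low
  rw [← hX, ← hY] at hiff
  cases h : pvScan low.toList
  · -- some pattern occurs: A must also return false
    have hE : ∃ p ∈ pvPatterns, p <:+: low.toList := (pvScan_eq_false_iff _).mp h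
    have hXY : (X || Y) ≠ false := fun hf => (hiff.mp hf) hE
    have hXYt : (X || Y) = true := by
      cases hb : (X || Y)
      · exact absurd hb hXY
      · rfl
    rcases Bool.or_eq_true_iff.mp hXYt with hx | hy
    · simp [hx]
    · by_cases hx : X = true <;> simp [hx, hy]
  · -- no pattern occurs: both loops fail, A returns true
    have hE : ¬ ∃ p ∈ pvPatterns, p <:+: low.toList := by
      intro hc; simp [(pvScan_eq_false_iff _).mpr hc] at h
    have hXY : (X || Y) = false := hiff.mpr hE
    rcases Bool.or_eq_false_iff.mp hXY with ⟨hx, hy⟩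
    simp [hx, hy]
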